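-- pv_equiv track=rewrite | github.com/itsmhyles/codepath_tip_102 | week_3/qn2.6.py | count_balanced_terrain_subsections
-- ===== SOURCE A (Python) =====
-- def identify_segments(terrain):
--     segments = []
--     count = 1
--     n = len(terrain)
--
--     for i in range(1, n):
--         if terrain[i] == terrain[i - 1]:
--             count += 1
--         else:
--             segments.append((terrain[i - 1], count))
--             count = 1
--     segments.append((terrain[-1], count))
--     return segments
--
-- def count_balanced_terrain_subsections(terrain):
--     segments = identify_segments(terrain)
--     balanced_count = 0
--
--     for i in range(len(segments) - 1):
--         if segments[i][0] != segments[i + 1][0]: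
--             min_count = min(segments[i][1], segments[i + 1][1])
--             balanced_count += min_count
--
--     return balanced_count
-- ===== SOURCE B (Python) =====
-- def count_balanced_terrain_subsections(terrain):
--     cur_char = terrain[0]
--     prev_run = 0
--     cur_run = 1
--     result = 0
--     for i in range(1, len(terrain)):
--         if terrain[i] == cur_char:
--             cur_run += 1
--         else:
--             result += min(prev_run, cur_run)
--             prev_run = cur_run
--             cur_run = 1
--             cur_char = terrain[i]
--     result += min(prev_run, cur_run)
--     return result
-- ===== Notes on version B (the rewrite author's own statement) =====
-- stated objective: simpler
-- what changed: B fuses A's two passes into one loop that maintains only the previous and current run-length counters, never materializing the segments list.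
import Mathlib
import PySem

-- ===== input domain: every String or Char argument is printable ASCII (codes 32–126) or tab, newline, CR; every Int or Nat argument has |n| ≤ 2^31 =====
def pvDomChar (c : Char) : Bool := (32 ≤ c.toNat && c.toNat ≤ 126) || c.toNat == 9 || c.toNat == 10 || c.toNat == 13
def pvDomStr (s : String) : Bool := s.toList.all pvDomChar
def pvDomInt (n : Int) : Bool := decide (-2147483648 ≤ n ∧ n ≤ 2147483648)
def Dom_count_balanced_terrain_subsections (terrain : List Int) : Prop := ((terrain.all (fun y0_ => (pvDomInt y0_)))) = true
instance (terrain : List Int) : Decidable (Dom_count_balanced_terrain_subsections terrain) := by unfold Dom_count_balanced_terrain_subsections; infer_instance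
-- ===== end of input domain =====

-- B fuses A's two passes (build segments list, then sum pairwise minima) into one loop keeping
-- only the previous and current run lengths (O(1) extra space); same return value on nonempty input.

-- ===== PORT A =====
-- the for-loop of identify_segments, walking i = 1..n-1; `prev` is terrain[i-1];
-- at exit `prev` is terrain[-1] (the list's last element)
def pvIdSegLoop : List Int → Int → Int → List (Int × Int) → List (Int × Int)
  | [], prev, count, segments => segments ++ [(prev, count)]
  | y :: ys, prev, count, segments =>
      if y = prev then pvIdSegLoop ys y (count + 1) segments
      else pvIdSegLoop ys y 1 (segments ++ [(prev, count)])

def identify_segments (terrain : List Int) : List (Int × Int) :=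
  match terrain with
  | [] => []                     -- Python raises IndexError here (terrain[-1]); outside Pre_
  | x :: rest => pvIdSegLoop rest x 1 []

-- the counting loop: for i in range(len(segments)-1), compare segments[i] with segments[i+1]
def pvCntLoop : List (Int × Int) → Int → Int
  | s1 :: s2 :: rest, acc =>
      pvCntLoop (s2 :: rest) (if s1.1 ≠ s2.1 then acc + min s1.2 s2.2 else acc)
  | _, acc => acc

def count_balanced_terrain_subsections (terrain : List Int) : Int :=
  pvCntLoop (identify_segments terrain) 0

-- ===== PORT B =====
-- single pass: cur_char, prev_run, cur_run, result as in Source B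
def pvBLoop : List Int → Int → Int → Int → Int → Int
  | [], _, prev_run, cur_run, result => result + min prev_run cur_run
  | y :: ys, cur_char, prev_run, cur_run, result =>
      if y = cur_char then pvBLoop ys cur_char prev_run (cur_run + 1) result
      else pvBLoop ys y cur_run 1 (result + min prev_run cur_run)

def count_balanced_terrain_subsections_alt (terrain : List Int) : Int :=
  match terrain with
  | [] => 0                      -- Python raises IndexError here (terrain[0]); outside Pre_
  | x :: rest => pvBLoop rest x 0 1 0

-- ===== PRECONDITION & SPEC =====
-- Pre_ excludes only the empty list, on which both A and B raise IndexError.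
def Pre_count_balanced_terrain_subsections (terrain : List Int) : Prop := terrain ≠ []
instance (terrain : List Int) : Decidable (Pre_count_balanced_terrain_subsections terrain) := by
  unfold Pre_count_balanced_terrain_subsections; infer_instance
def pvWitness_count_balanced_terrain_subsections : List Int := [1, 1, 2, 3, 3]

def Spec_count_balanced_terrain_subsections (terrain : List Int) (out : Int) : Prop := out = count_balanced_terrain_subsections_alt terrain
instance (terrain : List Int) (out : Int) : Decidable (Spec_count_balanced_terrain_subsections terrain out) := by unfold Spec_count_balanced_terrain_subsections; infer_instance

-- ===== CLAIM (what is proved, stated in full; the proofs are below) =====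
def Claim_equal_count_balanced_terrain_subsections : Prop := ∀ (terrain : List Int), Dom_count_balanced_terrain_subsections terrain → Pre_count_balanced_terrain_subsections terrain → Spec_count_balanced_terrain_subsections terrain (count_balanced_terrain_subsections terrain)

-- ===== LEMMAS AND PROOFS =====

-- identify_segments appends into `segments`, so the accumulator factors out
theorem pvIdSegLoop_acc (rest : List Int) (c count : Int) (segs : List (Int × Int)) :
    pvIdSegLoop rest c count segs = segs ++ pvIdSegLoop rest c count [] := by
  induction rest generalizing c count segs with
  | nil => simp [pvIdSegLoop]
  | cons y ys ih =>
      by_cases h : y = c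
      · simp only [pvIdSegLoop, if_pos h]
        exact ih y (count + 1) segs
      · simp only [pvIdSegLoop, if_neg h]
        rw [ih y 1 (segs ++ [(c, count)]), ih y 1 ([] ++ [(c, count)])]
        simp

-- the first segment produced is headed by the current char, with count ≥ cur
theorem pvIdSegLoop_head (rest : List Int) (c cur : Int) :
    ∃ k t, pvIdSegLoop rest c cur [] = (c, k) :: t ∧ cur ≤ k := by
  induction rest generalizing cur with
  | nil => exact ⟨cur, [], by simp [pvIdSegLoop], le_refl _⟩
  | cons y ys ih =>
      by_cases h : y = c
      · subst h
        obtain ⟨k, t, he, hk⟩ := ih (cur + 1)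
        exact ⟨k, t, by simp [pvIdSegLoop, he], by omega⟩
      · refine ⟨cur, pvIdSegLoop ys y 1 [], ?_, le_refl _⟩
        simp only [pvIdSegLoop, if_neg h]
        rw [pvIdSegLoop_acc]
        simp

-- main invariant: the B loop equals the counting loop run on a phantom previous
-- segment (d, prev_run) with d ≠ cur_char followed by the remaining segments
theorem pvLoop_inv (rest : List Int) (c prev cur acc d : Int) (hd : d ≠ c) :
    pvCntLoop ((d, prev) :: pvIdSegLoop rest c cur []) acc = pvBLoop rest c prev cur acc := by
  induction rest generalizing c prev cur acc d with
  | nil => simp [pvIdSegLoop, pvCntLoop, pvBLoop, if_pos hd]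
  | cons y ys ih =>
      by_cases h : y = c
      · subst h
        simp only [pvIdSegLoop, pvBLoop]
        exact ih _ _ _ acc d hd
      · simp only [pvIdSegLoop, if_neg h, pvBLoop]
        rw [pvIdSegLoop_acc ys y 1]
        simp only [List.nil_append, List.singleton_append]
        rw [pvCntLoop, if_pos hd]
        exact ih y cur 1 _ c (fun he => h he.symm)

-- a phantom previous segment of length 0 contributes nothing to the counting loop
theorem pvCntLoop_phantom (d : Int) (s : Int × Int) (t : List (Int × Int)) (acc : Int)
    (hs : 0 ≤ s.2) : pvCntLoop ((d, 0) :: s :: t) acc = pvCntLoop (s :: t) acc := by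
  simp only [pvCntLoop]
  have hm : min (0 : Int) s.2 = 0 := by omega
  split <;> simp [hm]

-- ===== VERDICT (by name: the statement is the Claim_ definition above) =====
theorem count_balanced_terrain_subsections_spec : Claim_equal_count_balanced_terrain_subsections := by
  intro terrain _ hpre
  unfold Spec_count_balanced_terrain_subsections
  match terrain with
  | [] => exact absurd rfl hpre
  | x :: rest =>
      show pvCntLoop (pvIdSegLoop rest x 1 []) 0 = pvBLoop rest x 0 1 0
      rw [← pvLoop_inv rest x 0 1 0 (x + 1) (by omega)]
      obtain ⟨k, t, he, hk⟩ := pvIdSegLoop_head rest x 1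
      rw [he, pvCntLoop_phantom (x + 1) (x, k) t 0 (by simpa using by omega)]
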